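-- pv_equiv track=rewrite | github.com/laneashipley-create/25-26-Tier-1-Soccer-Database | gen_report_recordings_library_html.py | order_description_columns
-- ===== SOURCE A (Python) =====
-- CANONICAL_API_DESCRIPTION_ORDER = [
--     "Sport Event Timeline",
--     "Sport Event Summary",
--     "Sport Event Lineups",
--     "Sport Event Extended Timeline",
--     "Sport Event Extended Summary",
--     "Season Standings",
--     "Season Summaries",
--     "Season Links",
--     "Season Info",
--     "Season Competitors",
--     "Season Missing Players",
--     "Season Leaders",
--     "Events",
-- ]
--
-- def order_description_columns(sorted_cols: list[str]) -> list[str]: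
--     """Apply canonical column order; unknown descriptions go before Events (still last)."""
--     available = set(sorted_cols)
--     ordered = [d for d in CANONICAL_API_DESCRIPTION_ORDER if d in available]
--     unknown = sorted(available - set(ordered))
--     if unknown:
--         if "Events" in ordered:
--             idx = ordered.index("Events")
--             ordered = ordered[:idx] + unknown + ordered[idx:]
--         else:
--             ordered.extend(unknown)
--     return ordered
-- ===== SOURCE B (Python) =====
-- CANONICAL_API_DESCRIPTION_ORDER = [
--     "Sport Event Timeline",
--     "Sport Event Summary",
--     "Sport Event Lineups",
--     "Sport Event Extended Timeline",
--     "Sport Event Extended Summary",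
--     "Season Standings",
--     "Season Summaries",
--     "Season Links",
--     "Season Info",
--     "Season Competitors",
--     "Season Missing Players",
--     "Season Leaders",
--     "Events",
-- ]
--
-- def order_description_columns(sorted_cols: list[str]) -> list[str]:
--     """Apply canonical column order; unknown descriptions go before Events (still last)."""
--     rank = {name: i for i, name in enumerate(CANONICAL_API_DESCRIPTION_ORDER)}
--     events_rank = rank.get("Events", len(CANONICAL_API_DESCRIPTION_ORDER))
--     def key(c):
--         r = rank.get(c)
--         if r is not None:
--             return (2 * r, "")
--         return (2 * events_rank - 1, c)
--     return sorted(set(sorted_cols), key=key)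
-- ===== Notes on version B (the rewrite author's own statement) =====
-- stated objective: simpler
-- what changed: Replaced the canonical-list filter + set-difference + index()/slice-insert assembly by a single sort of the distinct columns under a rank key built once from the canonical order (known names keyed by twice their index, unknown names keyed just before 'Events' and tie-broken alphabetically).
import Mathlib
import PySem

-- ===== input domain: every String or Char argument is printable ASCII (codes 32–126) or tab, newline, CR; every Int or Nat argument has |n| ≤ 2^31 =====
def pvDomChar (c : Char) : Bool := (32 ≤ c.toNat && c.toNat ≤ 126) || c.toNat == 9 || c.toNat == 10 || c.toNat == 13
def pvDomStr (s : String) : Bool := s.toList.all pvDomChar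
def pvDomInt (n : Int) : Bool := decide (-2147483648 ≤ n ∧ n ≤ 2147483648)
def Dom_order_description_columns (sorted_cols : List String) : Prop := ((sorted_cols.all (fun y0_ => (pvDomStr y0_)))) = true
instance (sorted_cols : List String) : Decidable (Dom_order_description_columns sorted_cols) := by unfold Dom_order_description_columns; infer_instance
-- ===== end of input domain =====

-- B replaces A's filter + set-difference + index/slice-insert by one single-pass sort of the distinct
-- columns under a rank key (unknowns keyed just before "Events", tie-broken alphabetically); objective: simpler.

def CANON : List String := [
  "Sport Event Timeline",
  "Sport Event Summary",
  "Sport Event Lineups",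
  "Sport Event Extended Timeline",
  "Sport Event Extended Summary",
  "Season Standings",
  "Season Summaries",
  "Season Links",
  "Season Info",
  "Season Competitors",
  "Season Missing Players",
  "Season Leaders",
  "Events"]

-- ===== PORT A =====
def order_description_columns (sorted_cols : List String) : List String :=
  let available : PySem.Set String := PySem.Set.ofList sorted_cols
  let ordered := CANON.filter (fun d => PySem.Set.contains available d)
  let unknown := PySem.List.sorted (PySem.Set.diff available (PySem.Set.ofList ordered)) (fun x => x)
  if unknown.isEmpty then ordered
  else if ordered.contains "Events" then
    let idx : Int := ((PySem.List.index? ordered "Events").getD 0 : Nat)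
    PySem.List.slice ordered none (some idx) ++ unknown ++ PySem.List.slice ordered (some idx) none
  else ordered ++ unknown

-- ===== PORT B =====
-- rank = {name: i for i, name in enumerate(CANONICAL_API_DESCRIPTION_ORDER)}
def pvRank : PySem.Dict String Int :=
  (PySem.List.enumerate CANON).foldl (fun d q => PySem.Dict.insert d q.2 q.1) PySem.Dict.empty

-- events_rank = rank.get("Events", len(CANONICAL_API_DESCRIPTION_ORDER))
def pvEventsRank : Int := PySem.Dict.getD pvRank "Events" (CANON.length : Int)

-- key(c) = (2*r, "") if r := rank.get(c) is not None else (2*events_rank - 1, c)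
def pvKey1 (c : String) : Int :=
  match PySem.Dict.get? pvRank c with
  | some r => 2 * r
  | none => 2 * pvEventsRank - 1

def pvKey2 (c : String) : String :=
  match PySem.Dict.get? pvRank c with
  | some _ => ""
  | none => c

def order_description_columns_alt (sorted_cols : List String) : List String :=
  PySem.List.sorted2 (PySem.Set.ofList sorted_cols) pvKey1 pvKey2

-- ===== PRECONDITION & SPEC =====
def Spec_order_description_columns (sorted_cols : List String) (out : List String) : Prop := out = order_description_columns_alt sorted_cols
instance (sorted_cols : List String) (out : List String) : Decidable (Spec_order_description_columns sorted_cols out) := by unfold Spec_order_description_columns; infer_instance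

-- ===== CLAIM (what is proved, stated in full; the proofs are below) =====
def Claim_equal_order_description_columns : Prop := ∀ (sorted_cols : List String), Dom_order_description_columns sorted_cols → Spec_order_description_columns sorted_cols (order_description_columns sorted_cols)

-- ===== LEMMAS AND PROOFS =====

-- the combined Python sort key, seen as one value in the lexicographic order on Int × String
def pvKey (c : String) : Lex (Int × String) := toLex (pvKey1 c, pvKey2 c)

-- the canonical names other than the trailing "Events"
def FRONT : List String := [
  "Sport Event Timeline",
  "Sport Event Summary",
  "Sport Event Lineups",
  "Sport Event Extended Timeline",
  "Sport Event Extended Summary",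
  "Season Standings",
  "Season Summaries",
  "Season Links",
  "Season Info",
  "Season Competitors",
  "Season Missing Players",
  "Season Leaders"]

theorem CANON_eq : CANON = FRONT ++ ["Events"] := rfl

-- sorted2 with a (k1, k2) tuple key is sorted with the lexicographic key toLex (k1 ·, k2 ·)
theorem sorted2_eq_sorted_lex {α : Type} (xs : List α) (k1 : α → Int) (k2 : α → String) :
    PySem.List.sorted2 xs k1 k2 = PySem.List.sorted xs (fun x => toLex (k1 x, k2 x)) := by
  have h2 : PySem.List.sorted2 xs k1 k2 =
      List.foldl (fun acc x => PySem.List.insertBy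
        (fun a b => (decide (k1 a < k1 b) || (!(decide (k1 b < k1 a)) && decide (k2 a < k2 b)))) x acc) [] xs := rfl
  rw [h2, PySem.List.sorted_eq_foldl_insertBy]
  congr 1
  funext acc x
  congr 1
  funext a b
  rcases lt_trichotomy (k1 a) (k1 b) with h | h | h
  · simp [h, Prod.Lex.toLex_lt_toLex]
  · simp [h, Prod.Lex.toLex_lt_toLex]
  · have hba : decide (k1 b < k1 a) = true := decide_eq_true h
    have hab : decide (k1 a < k1 b) = false := decide_eq_false (not_lt_of_gt h)
    have hlex : decide (toLex (k1 a, k2 a) < toLex (k1 b, k2 b)) = false := by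
      apply decide_eq_false
      intro hfull
      rcases Prod.Lex.toLex_lt_toLex.mp hfull with hlt | ⟨heq, _⟩
      · exact not_lt_of_gt h hlt
      · exact h.ne' heq
    rw [hab, hba, hlex]
    rfl

theorem pvRank_keys : pvRank.keys = CANON := by decide

theorem key_of_not_canon {c : String} (h : c ∉ CANON) : pvKey c = toLex (23, c) := by
  have hg : PySem.Dict.get? pvRank c = none := by
    rw [PySem.Dict.get?_eq_none_iff_not_mem_keys, pvRank_keys]; exact h
  have he : pvEventsRank = 12 := by decide
  simp [pvKey, pvKey1, pvKey2, hg, he]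

theorem key_Events : pvKey "Events" = toLex (24, "") := by decide

theorem key1_front : ∀ c ∈ FRONT, pvKey1 c ≤ 22 ∧ pvKey2 c = "" := by decide

theorem front_pairwise : List.Pairwise (fun a b => pvKey a < pvKey b) FRONT := by decide

-- A's result, written as  known-front ++ sorted-unknowns ++ (["Events"] if present)
theorem A_decomp (sorted_cols : List String) :
    order_description_columns sorted_cols =
      FRONT.filter (fun d => PySem.Set.contains (PySem.Set.ofList sorted_cols) d)
      ++ (PySem.List.sorted (PySem.Set.diff (PySem.Set.ofList sorted_cols)
            (PySem.Set.ofList (CANON.filter (fun d => PySem.Set.contains (PySem.Set.ofList sorted_cols) d)))) (fun x => x)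
      ++ (if PySem.Set.contains (PySem.Set.ofList sorted_cols) "Events" then ["Events"] else [])) := by
  simp only [order_description_columns]
  set S := PySem.Set.ofList sorted_cols with hS
  set F := FRONT.filter (fun d => PySem.Set.contains S d) with hF
  set U := PySem.List.sorted (PySem.Set.diff S (PySem.Set.ofList (CANON.filter (fun d => PySem.Set.contains S d)))) (fun x => x) with hU
  have hEvF : "Events" ∉ F := by
    intro hmem
    have h1 := List.mem_of_mem_filter hmem
    simp [FRONT] at h1
  have hordered : CANON.filter (fun d => PySem.Set.contains S d)
      = F ++ (if PySem.Set.contains S "Events" then ["Events"] else []) := by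
    rw [CANON_eq, List.filter_append]
    congr 1
    cases hb : PySem.Set.contains S "Events" with
    | true =>
      have hm : "Events" ∈ S := (PySem.Set.contains_iff S _).mp hb
      simp [List.filter, hm]
    | false =>
      have hm : "Events" ∉ S := fun hm => by
        rw [(PySem.Set.contains_iff S _).mpr hm] at hb
        exact Bool.true_eq_false.mp hb
      simp [List.filter, hm]
  by_cases hu : U.isEmpty
  · rw [if_pos hu, hordered, List.isEmpty_iff.mp hu]
    simp
  · rw [if_neg hu]
    by_cases hev : PySem.Set.contains S "Events" = true
    · have hor2 : CANON.filter (fun d => PySem.Set.contains S d) = F ++ ["Events"] := by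
        rw [hordered, if_pos hev]
      rw [hor2]
      have hc : (F ++ ["Events"]).contains "Events" = true := by
        simp
      rw [if_pos hc, PySem.List.index?_append_singleton_self F "Events" hEvF]
      simp only [Option.getD_some]
      rw [PySem.List.slice_to_natCast, PySem.List.slice_from_natCast, List.take_left, List.drop_left]
      rw [if_pos hev, List.append_assoc]
    · have hor2 : CANON.filter (fun d => PySem.Set.contains S d) = F := by
        rw [hordered, if_neg hev]
        simp
      have hc : (F).contains "Events" = false := by
        rw [Bool.eq_false_iff]
        intro hcc
        exact hEvF (List.contains_iff_mem.mp hcc)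
      rw [hor2, hc]
      have hev' : "Events" ∉ S := fun hm => hev ((PySem.Set.contains_iff S "Events").mpr hm)
      simp [hev']

-- ===== VERDICT (by name: the statement is the Claim_ definition above) =====
theorem order_description_columns_spec : Claim_equal_order_description_columns := by
  intro sorted_cols _
  unfold Spec_order_description_columns order_description_columns_alt
  rw [sorted2_eq_sorted_lex, A_decomp]
  set S := PySem.Set.ofList sorted_cols with hS
  set F := FRONT.filter (fun d => PySem.Set.contains S d) with hF
  set U := PySem.List.sorted (PySem.Set.diff S (PySem.Set.ofList (CANON.filter (fun d => PySem.Set.contains S d)))) (fun x => x) with hU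
  set E := (if PySem.Set.contains S "Events" then ["Events"] else ([] : List String)) with hE
  have hSnd : S.Nodup := PySem.Set.nodup_ofList sorted_cols
  have hFmem : ∀ x, x ∈ F ↔ x ∈ FRONT ∧ x ∈ S := by
    intro x
    rw [hF, List.mem_filter, PySem.Set.contains_iff]
  have hSmem : ∀ x : String, x ∈ S ↔ x ∈ sorted_cols := fun x => PySem.Set.mem_ofList _ x
  have hUmem : ∀ x, x ∈ U ↔ x ∈ S ∧ x ∉ CANON := by
    intro x
    rw [hU]
    simp only [PySem.List.mem_sorted, PySem.Set.mem_diff, PySem.Set.mem_ofList, List.mem_filter,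
      hSmem x]
    constructor
    · rintro ⟨h1, h2⟩
      exact ⟨h1, fun hc => h2 ⟨hc, (PySem.Set.contains_iff S x).mpr ((hSmem x).mpr h1)⟩⟩
    · rintro ⟨h1, h2⟩
      exact ⟨h1, fun hc => h2 hc.1⟩
  have hEmem : ∀ x, x ∈ E ↔ x = "Events" ∧ "Events" ∈ S := by
    intro x
    rw [hE]
    by_cases hev : PySem.Set.contains S "Events" = true
    · rw [if_pos hev]
      simp [PySem.Set.contains_iff S "Events" |>.mp hev]
    · rw [if_neg hev]
      simp only [List.not_mem_nil, false_iff]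
      rintro ⟨rfl, hm⟩
      exact hev ((PySem.Set.contains_iff S "Events").mpr hm)
  have hFRONTsub : ∀ x ∈ FRONT, x ∈ CANON := by decide
  have hEvCANON : "Events" ∈ CANON := by decide
  have hFnd : F.Nodup := List.Nodup.filter _ (by decide : FRONT.Nodup)
  have hUnd : U.Nodup := by
    rw [(PySem.List.sorted_perm _ _ _).nodup_iff]
    exact PySem.Set.nodup_diff _ _ hSnd
  have hEnd : E.Nodup := by
    rw [hE]; by_cases hev : PySem.Set.contains S "Events" = true
    · rw [if_pos hev]; simp
    · rw [if_neg hev]; simp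
  -- the permutation
  have hperm : (F ++ (U ++ E)).Perm S := by
    rw [List.perm_ext_iff_of_nodup ?_ hSnd]
    · intro a
      simp only [List.mem_append]
      constructor
      · rintro (ha | ha | ha)
        · exact ((hFmem a).mp ha).2
        · exact ((hUmem a).mp ha).1
        · rcases (hEmem a).mp ha with ⟨rfl, hm⟩; exact hm
      · intro ha
        by_cases hc : a ∈ CANON
        · rw [CANON_eq] at hc
          rcases List.mem_append.mp hc with hf | he
          · exact Or.inl ((hFmem a).mpr ⟨hf, ha⟩)
          · simp at he
            subst he
            exact Or.inr (Or.inr ((hEmem _).mpr ⟨rfl, ha⟩))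
        · exact Or.inr (Or.inl ((hUmem a).mpr ⟨ha, hc⟩))
    · rw [List.nodup_append]
      refine ⟨hFnd, ?_, ?_⟩
      · rw [List.nodup_append]
        refine ⟨hUnd, hEnd, ?_⟩
        intro a ha b hb
        rcases (hEmem b).mp hb with ⟨rfl, _⟩
        exact fun h => ((hUmem a).mp ha).2 (h ▸ hEvCANON)
      · intro a ha b hb
        have haC : a ∈ CANON := hFRONTsub a ((hFmem a).mp ha).1
        rcases List.mem_append.mp hb with hbu | hbe
        · exact fun h => ((hUmem b).mp hbu).2 (h ▸ haC)
        · rcases (hEmem b).mp hbe with ⟨rfl, _⟩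
          intro h
          exact (by decide : "Events" ∉ FRONT) (h ▸ ((hFmem a).mp ha).1)
  -- strict pairwise order under the key
  have hpw : List.Pairwise (fun a b => pvKey a < pvKey b) (F ++ (U ++ E)) := by
    rw [List.pairwise_append]
    refine ⟨front_pairwise.filter _, ?_, ?_⟩
    · rw [List.pairwise_append]
      have hUpw : List.Pairwise (fun a b : String => a < b) U := by
        have h1 : List.Pairwise (fun a b : String => a ≤ b) U := PySem.List.sorted_pairwise _ _
        exact (h1.and hUnd).imp (fun h => lt_of_le_of_ne h.1 h.2)
      refine ⟨?_, ?_, ?_⟩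
      · refine hUpw.imp_of_mem (fun {a b} ha hb hab => ?_)
        rw [key_of_not_canon ((hUmem a).mp ha).2, key_of_not_canon ((hUmem b).mp hb).2]
        rw [Prod.Lex.toLex_lt_toLex]
        exact Or.inr ⟨rfl, hab⟩
      · rw [hE]
        by_cases hev : PySem.Set.contains S "Events" = true
        · rw [if_pos hev]; simp
        · rw [if_neg hev]; simp
      · intro a ha b hb
        rcases (hEmem b).mp hb with ⟨rfl, _⟩
        rw [key_of_not_canon ((hUmem a).mp ha).2, key_Events, Prod.Lex.toLex_lt_toLex]
        exact Or.inl (by norm_num)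
    · intro a ha b hb
      have haf := key1_front a ((hFmem a).mp ha).1
      have hka : pvKey a = toLex (pvKey1 a, pvKey2 a) := rfl
      rcases List.mem_append.mp hb with hbu | hbe
      · rw [hka, key_of_not_canon ((hUmem b).mp hbu).2, Prod.Lex.toLex_lt_toLex]
        exact Or.inl (by simp; omega)
      · rcases (hEmem b).mp hbe with ⟨rfl, _⟩
        rw [hka, key_Events, Prod.Lex.toLex_lt_toLex]
        exact Or.inl (by simp; omega)
  exact (PySem.List.sorted_eq_of_perm_of_pairwise_lt S (F ++ (U ++ E)) pvKey hperm hpw).symm
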